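-- pv_equiv track=rewrite | github.com/lurf21/NextEditPrediction | data/data_processing.py | edit_chunk_len
-- ===== SOURCE A (Python) =====
-- def edit_chunk_len(diff_content, max_len):
--     """
--     Ensure that the length of every edit chunk in a diff is less than a given threshold.
--
--     :param diff_content: str, content of the diff
--     :param max_len: int, maximum allowed length of an edit chunk
--     :return: bool, True if all edit chunks are within the length limit, False otherwise
--     """
--     lines = diff_content.split('\n')
--     lines = lines[2:]
--
--     current_chunk_length = 0
--     in_edit_chunk = False
--
--     for line in lines:
--         if line.startswith('+') or line.startswith('-'):
--             if not in_edit_chunk: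
--                 in_edit_chunk = True
--                 current_chunk_length = 1
--             else:
--                 current_chunk_length += 1
--         else:
--             if in_edit_chunk and current_chunk_length > max_len:
--                 return False
--             in_edit_chunk = False
--             current_chunk_length = 0
--
--     if in_edit_chunk and current_chunk_length > max_len:
--         return False
--
--     return True
-- ===== SOURCE B (Python) =====
-- def edit_chunk_len(diff_content, max_len):
--     """
--     Ensure that the length of every edit chunk in a diff is less than a given threshold.
--     Two-stage: segment the lines into maximal runs of edit lines, then check every
--     run length against the limit.
--     """
--     lines = diff_content.split('\n')[2:]
--
--     def is_edit(line):
--         return line.startswith('+') or line.startswith('-')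
--
--     # Stage 1: collect the length of each maximal run of edit lines.
--     chunk_lengths = []
--     i, n = 0, len(lines)
--     while i < n:
--         if is_edit(lines[i]):
--             j = i + 1
--             while j < n and is_edit(lines[j]):
--                 j += 1
--             chunk_lengths.append(j - i)
--             i = j
--         else:
--             i += 1
--
--     # Stage 2: a single pass over the collected chunk sizes.
--     return all(c <= max_len for c in chunk_lengths)
-- ===== Notes on version B (the rewrite author's own statement) =====
-- stated objective: alternative
-- what changed: Replaced A's single-pass in_edit_chunk/current_chunk_length state machine with early return by a two-stage computation: first segment the lines into maximal runs of edit lines collecting each run's length, then check all collected lengths against max_len in one pass.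
import Mathlib
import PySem

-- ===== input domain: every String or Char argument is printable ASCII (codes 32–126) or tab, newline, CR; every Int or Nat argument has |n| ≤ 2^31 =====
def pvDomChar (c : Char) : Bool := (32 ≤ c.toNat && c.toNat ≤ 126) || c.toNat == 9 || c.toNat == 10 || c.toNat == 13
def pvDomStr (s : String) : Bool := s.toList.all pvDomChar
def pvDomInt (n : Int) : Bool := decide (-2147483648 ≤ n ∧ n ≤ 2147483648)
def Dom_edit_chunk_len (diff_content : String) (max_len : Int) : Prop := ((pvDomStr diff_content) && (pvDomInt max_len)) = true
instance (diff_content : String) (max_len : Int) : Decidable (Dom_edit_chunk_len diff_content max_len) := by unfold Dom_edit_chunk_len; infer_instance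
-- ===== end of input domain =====

-- B replaces A's in_edit_chunk/current_chunk_length state machine with a two-stage
-- segment-then-check computation (collect all edit-run lengths, then check them all);
-- objective: alternative decomposition, same asymptotic cost.

-- the shared line predicate: line.startswith('+') or line.startswith('-')
def pvIsEdit (l : List Char) : Bool :=
  PySem.Chars.startswith l ['+'] || PySem.Chars.startswith l ['-']

-- ===== PORT A =====
-- A's for-loop with state (current_chunk_length, in_edit_chunk) and early return
def pvALoop (max_len : Int) : List (List Char) → Int → Bool → Bool
  | [], cur, inC => !(inC && decide (max_len < cur))
  | l :: rest, cur, inC =>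
    if pvIsEdit l then
      if !inC then pvALoop max_len rest 1 true
      else pvALoop max_len rest (cur + 1) true
    else
      if inC && decide (max_len < cur) then false
      else pvALoop max_len rest 0 false

def edit_chunk_len (diff_content : String) (max_len : Int) : Bool :=
  let lines := PySem.Chars.splitOn diff_content.toList ['\n']
  let lines := PySem.List.slice lines (some 2) none
  pvALoop max_len lines 0 false

-- ===== PORT B =====
-- Stage 1 of Source B: the inner while-scan (j past the run) is takeWhile/dropWhile
def pvChunks : List (List Char) → List Nat
  | [] => []
  | l :: rest =>
    if pvIsEdit l then
      (1 + (rest.takeWhile pvIsEdit).length) :: pvChunks (rest.dropWhile pvIsEdit)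
    else pvChunks rest
termination_by lines => lines.length
decreasing_by
  · exact Nat.lt_succ_of_le (List.length_dropWhile_le _ _)
  · exact Nat.lt_succ_of_le (Nat.le_refl _)

def edit_chunk_len_alt (diff_content : String) (max_len : Int) : Bool :=
  let lines := PySem.Chars.splitOn diff_content.toList ['\n']
  let lines := PySem.List.slice lines (some 2) none
  (pvChunks lines).all (fun c => decide ((c : Int) ≤ max_len))

-- ===== PRECONDITION & SPEC =====
def Spec_edit_chunk_len (diff_content : String) (max_len : Int) (out : Bool) : Prop := out = edit_chunk_len_alt diff_content max_len
instance (diff_content : String) (max_len : Int) (out : Bool) : Decidable (Spec_edit_chunk_len diff_content max_len out) := by unfold Spec_edit_chunk_len; infer_instance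

-- ===== CLAIM (what is proved, stated in full; the proofs are below) =====
def Claim_equal_edit_chunk_len : Prop := ∀ (diff_content : String) (max_len : Int), Dom_edit_chunk_len diff_content max_len → Spec_edit_chunk_len diff_content max_len (edit_chunk_len diff_content max_len)

-- ===== LEMMAS AND PROOFS =====

-- consuming a run of edit lines just adds its length to the counter
theorem pvALoop_run (m : Int) (r : List (List Char)) (h : ∀ x ∈ r, pvIsEdit x = true) :
    ∀ (rest : List (List Char)) (c : Int),
      pvALoop m (r ++ rest) c true = pvALoop m rest (c + r.length) true := by
  induction r with
  | nil => intro rest c; simp only [List.nil_append, List.length_nil, Nat.cast_zero, Int.add_zero]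
  | cons x r' ih =>
    intro rest c
    have hx : pvIsEdit x = true := h x (List.mem_cons_self ..)
    have hr' : ∀ y ∈ r', pvIsEdit y = true := fun y hy => h y (List.mem_cons_of_mem _ hy)
    have step : pvALoop m ((x :: r') ++ rest) c true = pvALoop m (r' ++ rest) (c + 1) true := by
      simp [pvALoop, hx]
    rw [step, ih hr' rest (c + 1)]
    have harg : c + 1 + (r'.length : Int) = c + ((x :: r').length : Int) := by
      push_cast [List.length_cons]; ring
    rw [harg]

-- closing a chunk: if the remaining lines start outside a chunk (empty or non-edit head),
-- the pending counter is checked and the loop restarts in the out-of-chunk state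
theorem pvALoop_close (m : Int) (lines : List (List Char))
    (h : lines = [] ∨ ∃ l rest, lines = l :: rest ∧ pvIsEdit l = false) (c : Int) :
    pvALoop m lines c true = ((decide (c ≤ m)) && pvALoop m lines 0 false) := by
  rcases h with h | ⟨l, rest, rfl, hl⟩
  · subst h
    by_cases hc : m < c
    · have h2 : ¬ c ≤ m := by omega
      simp [pvALoop, hc, h2]
    · have h2 : c ≤ m := by omega
      simp [pvALoop, hc, h2]
  · by_cases hc : m < c
    · have h2 : ¬ c ≤ m := by omega
      simp [pvALoop, hl, hc, h2]
    · have h2 : c ≤ m := by omega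
      simp [pvALoop, hl, hc, h2]

-- head shape of a dropWhile result
theorem dropWhile_shape (p : List Char → Bool) (xs : List (List Char)) :
    xs.dropWhile p = [] ∨ ∃ l rest, xs.dropWhile p = l :: rest ∧ p l = false := by
  rcases hd : xs.dropWhile p with _ | ⟨l, rest⟩
  · exact Or.inl rfl
  · refine Or.inr ⟨l, rest, rfl, ?_⟩
    have := List.head_dropWhile_not p (l := xs) (by simp [hd])
    simpa [hd] using this

-- the main invariant: A's loop from the initial state equals B's all-chunks check
theorem pvALoop_eq_chunks (m : Int) :
    ∀ (n : Nat) (lines : List (List Char)), lines.length ≤ n →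
      pvALoop m lines 0 false = (pvChunks lines).all (fun c => decide ((c : Int) ≤ m)) := by
  intro n
  induction n with
  | zero => intro lines h; rw [List.length_eq_zero_iff.mp (Nat.le_zero.mp h)]; simp [pvALoop, pvChunks]
  | succ n ih =>
    intro lines h
    rcases lines with _ | ⟨l, rest⟩
    · simp [pvALoop, pvChunks]
    · by_cases hl : pvIsEdit l = true
      · -- entering a chunk: consume the run, then close it
        have hsplit : rest = rest.takeWhile pvIsEdit ++ rest.dropWhile pvIsEdit :=
          (List.takeWhile_append_dropWhile (p := pvIsEdit) (l := rest)).symm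
        have hrun : ∀ x ∈ rest.takeWhile pvIsEdit, pvIsEdit x = true :=
          fun x hx => List.mem_takeWhile_imp hx
        have hlen : (rest.dropWhile pvIsEdit).length ≤ n := by
          have h1 := List.length_dropWhile_le pvIsEdit rest
          simp only [List.length_cons] at h
          omega
        simp only [pvALoop, hl, if_true, Bool.not_false, pvChunks]
        rw [show pvALoop m rest 1 true
              = pvALoop m (rest.takeWhile pvIsEdit ++ rest.dropWhile pvIsEdit) 1 true by
              rw [← hsplit]]
        rw [pvALoop_run m _ hrun]
        rw [pvALoop_close m _ (dropWhile_shape pvIsEdit rest)]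
        rw [ih _ hlen]
        simp only [List.all_cons]
        push_cast
        rfl
      · -- a non-edit line outside a chunk is skipped by both
        have hl' : pvIsEdit l = false := Bool.eq_false_iff.mpr hl
        have hlen : rest.length ≤ n := by simp only [List.length_cons] at h; omega
        simp only [pvALoop, hl', if_false, pvChunks, Bool.false_and, Bool.false_eq_true]
        exact ih rest hlen

-- ===== VERDICT (by name: the statement is the Claim_ definition above) =====
theorem edit_chunk_len_spec : Claim_equal_edit_chunk_len := by
  intro diff_content max_len _
  unfold Spec_edit_chunk_len edit_chunk_len edit_chunk_len_alt
  exact pvALoop_eq_chunks max_len _ _ (Nat.le_refl _)
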